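-- pv_equiv track=rewrite | github.com/HenkieTenkie62/mcp-searxng-enhanced-sse-http | mcp_server.py | generate_excerpt
-- ===== SOURCE A (Python) =====
-- def generate_excerpt(content: str, max_length: int = 200) -> str:
--     lines = content.splitlines()
--     excerpt = ""
--     for line in lines:
--         if len(excerpt) + len(line) + 1 < max_length:
--             excerpt += line + "\n"
--         else:
--             remaining = max_length - len(excerpt) - 4
--             if remaining > 0:
--                 excerpt += line[:remaining] + " ..."
--             break
--     return excerpt.strip() if excerpt else content[:max_length] + "..."
-- ===== SOURCE B (Python) =====
-- def generate_excerpt(content: str, max_length: int = 200) -> str: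
--     lines = content.splitlines()
--     prefix = [0]
--     for line in lines:
--         prefix.append(prefix[-1] + len(line) + 1)
--     j = next((i for i in range(len(lines)) if prefix[i + 1] >= max_length), None)
--     if j is None:
--         excerpt = "".join(line + "\n" for line in lines)
--     else:
--         remaining = max_length - prefix[j] - 4
--         tail = lines[j][:remaining] + " ..." if remaining > 0 else ""
--         excerpt = "".join(line + "\n" for line in lines[:j]) + tail
--     return excerpt.strip() if excerpt else content[:max_length] + "..."
-- ===== Notes on version B (the rewrite author's own statement) =====
-- stated objective: alternative
-- what changed: A builds the excerpt incrementally inside the loop and breaks mid-iteration; B first computes prefix sums of per-line costs, scans them to find the cut line index, then assembles the excerpt in one join plus an optional truncated tail.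
import Mathlib
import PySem

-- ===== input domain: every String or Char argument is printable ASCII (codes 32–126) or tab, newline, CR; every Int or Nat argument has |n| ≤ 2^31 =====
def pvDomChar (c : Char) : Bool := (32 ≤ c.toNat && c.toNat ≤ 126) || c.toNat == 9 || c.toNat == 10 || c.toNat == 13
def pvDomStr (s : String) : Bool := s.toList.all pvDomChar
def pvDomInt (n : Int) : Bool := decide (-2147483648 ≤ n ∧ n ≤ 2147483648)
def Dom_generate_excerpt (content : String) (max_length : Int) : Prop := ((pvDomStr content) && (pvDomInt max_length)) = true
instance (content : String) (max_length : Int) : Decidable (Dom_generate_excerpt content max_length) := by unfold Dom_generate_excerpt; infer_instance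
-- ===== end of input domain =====

-- B replaces A's incremental accumulate-and-break string building by a pref-sums scan
-- (find the cut line index first, then join the kept lines once); objective: alternative decomposition.

-- ===== PORT A =====
-- A's for-loop with break, carrying the growing excerpt string
def geLoopA (M : Int) : List (List Char) → List Char → List Char
  | [], excerpt => excerpt
  | line :: lines, excerpt =>
    if (excerpt.length : Int) + (line.length : Int) + 1 < M then
      geLoopA M lines (excerpt ++ line ++ ['\n'])
    else
      let remaining := M - (excerpt.length : Int) - 4
      if remaining > 0 then
        excerpt ++ PySem.List.slice line none (some remaining) ++ [' ', '.', '.', '.']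
      else excerpt

def generate_excerpt (content : String) (max_length : Int) : String :=
  let lines := PySem.Chars.splitlines content.toList
  let excerpt := geLoopA max_length lines []
  if excerpt ≠ [] then String.ofList (PySem.Chars.strip excerpt)
  else String.ofList (PySem.List.slice content.toList none (some max_length) ++ ['.', '.', '.'])

-- ===== PORT B =====
-- pref = [0]; for line in lines: pref.append(pref[-1] + len(line) + 1)
def gePrefix (lines : List (List Char)) : List Int :=
  lines.foldl (fun p line => p ++ [PySem.List.pyGetD p (-1) 0 + (line.length : Int) + 1]) [0]

-- "".join(line + "\n" for line in lines)
def geJoin (lines : List (List Char)) : List Char :=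
  PySem.Chars.join [] (lines.map (fun line => line ++ ['\n']))

-- the excerpt assembled from the cut index j (None = all lines fit)
def geExcerptB (M : Int) (lines : List (List Char)) : List Char :=
  let pref := gePrefix lines
  let j? := (PySem.List.pyRange 0 (lines.length : Int) 1).find?
      (fun i => decide (M ≤ PySem.List.pyGetD pref (i + 1) 0))
  match j? with
  | none => geJoin lines
  | some j =>
    let remaining := M - PySem.List.pyGetD pref j 0 - 4
    let tail := if remaining > 0 then
        PySem.List.slice (PySem.List.pyGetD lines j []) none (some remaining) ++ [' ', '.', '.', '.']
      else []
    geJoin (PySem.List.slice lines none (some j)) ++ tail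

def generate_excerpt_alt (content : String) (max_length : Int) : String :=
  let lines := PySem.Chars.splitlines content.toList
  let excerpt := geExcerptB max_length lines
  if excerpt ≠ [] then String.ofList (PySem.Chars.strip excerpt)
  else String.ofList (PySem.List.slice content.toList none (some max_length) ++ ['.', '.', '.'])

-- ===== PRECONDITION & SPEC =====
def Spec_generate_excerpt (content : String) (max_length : Int) (out : String) : Prop := out = generate_excerpt_alt content max_length
instance (content : String) (max_length : Int) (out : String) : Decidable (Spec_generate_excerpt content max_length out) := by unfold Spec_generate_excerpt; infer_instance

-- ===== CLAIM (what is proved, stated in full; the proofs are below) =====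
def Claim_equal_generate_excerpt : Prop := ∀ (content : String) (max_length : Int), Dom_generate_excerpt content max_length → Spec_generate_excerpt content max_length (generate_excerpt content max_length)

-- ===== LEMMAS AND PROOFS =====

-- proof-side common characterization: the excerpt as a budget-carrying recursion
def geRec (M : Int) : List (List Char) → List Char
  | [] => []
  | line :: lines =>
    if (line.length : Int) + 1 < M then
      line ++ '\n' :: geRec (M - (line.length : Int) - 1) lines
    else if M - 4 > 0 then
      PySem.List.slice line none (some (M - 4)) ++ [' ', '.', '.', '.']
    else []

theorem geLoopA_eq_geRec (M : Int) (lines : List (List Char)) :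
    ∀ acc : List Char, geLoopA M lines acc = acc ++ geRec (M - (acc.length : Int)) lines := by
  induction lines with
  | nil => intro acc; simp [geLoopA, geRec]
  | cons line lines ih =>
    intro acc
    simp only [geLoopA, geRec]
    by_cases h : (acc.length : Int) + (line.length : Int) + 1 < M
    · rw [if_pos h, ih, if_pos (show ((line.length : Int)) + 1 < M - (acc.length : Int) by omega)]
      have hb : M - (((acc ++ line ++ ['\n']).length : Nat) : Int)
          = M - (acc.length : Int) - (line.length : Int) - 1 := by
        simp; ring
      rw [hb]
      simp [List.append_assoc]
    · rw [if_neg h, if_neg (show ¬(((line.length : Int)) + 1 < M - (acc.length : Int)) by omega)]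
      by_cases h4 : M - (acc.length : Int) - 4 > 0
      · rw [if_pos h4, if_pos h4]
        simp [List.append_assoc]
      · rw [if_neg h4, if_neg h4]
        simp

theorem geJoin_cons (line : List Char) (lines : List (List Char)) :
    geJoin (line :: lines) = line ++ '\n' :: geJoin lines := by
  cases lines with
  | nil => simp [geJoin, PySem.Chars.join, List.intercalate]
  | cons q rest =>
    simp only [geJoin, List.map_cons]
    rw [PySem.Chars.join_cons_cons]
    simp

-- a foldl-append loop whose step only reads the last element splits off a pref
theorem gePrefix_shift (lines : List (List Char)) :
    ∀ (p : List Int) (a : Int),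
      lines.foldl (fun p line => p ++ [PySem.List.pyGetD p (-1) 0 + (line.length : Int) + 1]) (p ++ [a])
      = p ++ lines.foldl (fun p line => p ++ [PySem.List.pyGetD p (-1) 0 + (line.length : Int) + 1]) [a] := by
  induction lines with
  | nil => intro p a; simp
  | cons line lines ih =>
    intro p a
    simp only [List.foldl_cons, PySem.List.pyGetD_neg_one_append_singleton]
    have ha : PySem.List.pyGetD ([a] : List Int) (-1) 0 = a := by
      simpa using PySem.List.pyGetD_neg_one_append_singleton ([] : List Int) a 0
    rw [ha, ih (p ++ [a]) (a + (line.length : Int) + 1),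
        ih [a] (a + (line.length : Int) + 1)]
    simp [List.append_assoc]

-- the loop started from [a] is the loop from [0] shifted by a
theorem gePrefix_translate (lines : List (List Char)) :
    ∀ (p : List Int) (a : Int), p ≠ [] →
      lines.foldl (fun p line => p ++ [PySem.List.pyGetD p (-1) 0 + (line.length : Int) + 1])
          (p.map (· + a))
      = (lines.foldl (fun p line => p ++ [PySem.List.pyGetD p (-1) 0 + (line.length : Int) + 1]) p).map (· + a) := by
  induction lines with
  | nil => intro p a _; simp
  | cons line lines ih =>
    intro p a hp
    simp only [List.foldl_cons]
    rw [PySem.List.pyGetD_neg_one _ _ (by simpa using hp),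
        PySem.List.pyGetD_neg_one _ _ hp, List.getLast_map]
    have : (p.map (· + a)) ++ [p.getLast hp + a + (line.length : Int) + 1]
        = (p ++ [p.getLast hp + (line.length : Int) + 1]).map (· + a) := by
      simp; ring_nf
    rw [this, ih _ a (by simp)]

theorem gePrefix_cons (line : List Char) (lines : List (List Char)) :
    gePrefix (line :: lines) = 0 :: (gePrefix lines).map (· + ((line.length : Int) + 1)) := by
  unfold gePrefix
  simp only [List.foldl_cons]
  have ha : PySem.List.pyGetD ([(0 : Int)] : List Int) (-1) 0 = 0 := by
    simpa using PySem.List.pyGetD_neg_one_append_singleton ([] : List Int) (0 : Int) 0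
  rw [ha, gePrefix_shift]
  rw [show ([(0 : Int) + (line.length : Int) + 1] : List Int)
        = ([(0 : Int)] : List Int).map (· + ((line.length : Int) + 1)) from by simp]
  rw [gePrefix_translate _ _ _ (by simp)]
  rfl

theorem gePrefix_length (lines : List (List Char)) : (gePrefix lines).length = lines.length + 1 := by
  induction lines with
  | nil => rfl
  | cons line lines ih => rw [gePrefix_cons]; simp [ih]

-- head of every pref list is 0
theorem gePrefix_getD_zero (lines : List (List Char)) :
    PySem.List.pyGetD (gePrefix lines) (0 : Int) 0 = 0 := by
  cases lines with
  | nil => rfl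
  | cons line lines => rw [gePrefix_cons, PySem.List.pyGetD_zero_cons]

-- reading the cons pref list one step in is reading the tail's, shifted by the head line's cost
theorem gePrefix_getD_succ (line : List Char) (lines : List (List Char)) (k : Nat)
    (hk : k ≤ lines.length) :
    PySem.List.pyGetD (gePrefix (line :: lines)) ((k : Int) + 1) 0
      = PySem.List.pyGetD (gePrefix lines) (k : Int) 0 + ((line.length : Int) + 1) := by
  rw [gePrefix_cons]
  have hq : k < (gePrefix lines).length := by rw [gePrefix_length]; omega
  rw [show ((k : Int) + 1) = (((k + 1 : Nat)) : Int) from by push_cast; ring]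
  rw [PySem.List.pyGetD_natCast, PySem.List.pyGetD_natCast]
  rw [List.getD_cons_succ]
  rw [List.getD_eq_getElem _ _ (by simpa using hq), List.getD_eq_getElem _ _ hq]
  simp

theorem find?_congr_mem {α : Type} (l : List α) (p q : α → Bool)
    (h : ∀ a ∈ l, p a = q a) : l.find? p = l.find? q := by
  induction l with
  | nil => rfl
  | cons x xs ih =>
    simp only [List.find?_cons, h x (by simp)]
    cases q x <;> simp_all

theorem geExcerptB_eq_geRec (lines : List (List Char)) :
    ∀ M : Int, geExcerptB M lines = geRec M lines := by
  induction lines with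
  | nil =>
    intro M
    simp [geExcerptB, geRec, geJoin, PySem.List.pyRange, PySem.Chars.join_nil]
  | cons line lines ih =>
    intro M
    have hc : (0 : Int) ≤ (line.length : Int) + 1 := by positivity
    set c : Int := (line.length : Int) + 1 with hcdef
    unfold geExcerptB
    simp only [List.length_cons]
    rw [PySem.List.pyRange_zero_natCast, List.range_succ_eq_map, List.map_cons,
        List.map_map]
    have h1 : PySem.List.pyGetD (gePrefix (line :: lines)) ((0 : Int) + 1) 0 = c := by
      have := gePrefix_getD_succ line lines 0 (by omega)
      simpa [gePrefix_getD_zero] using this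
    simp only [Nat.cast_zero] at h1 ⊢
    by_cases h0 : M ≤ c
    · -- cut at the first line
      have hpos : (List.find? (fun i => decide (M ≤ PySem.List.pyGetD (gePrefix (line :: lines)) (i + 1) 0))
          ((0 : Int) :: List.map ((fun k : Nat => ((k : Nat) : Int)) ∘ Nat.succ) (List.range lines.length))) = some 0 := by
        apply List.find?_cons_of_pos
        show decide (M ≤ PySem.List.pyGetD (gePrefix (line :: lines)) ((0 : Int) + 1) 0) = true
        rw [h1]; exact decide_eq_true h0
      simp only [hpos]
      have hg0 : PySem.List.pyGetD (gePrefix (line :: lines)) (0 : Int) 0 = 0 :=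
        gePrefix_getD_zero _
      rw [hg0]
      have hsl : PySem.List.slice (line :: lines) none (some (0 : Int)) = [] := by
        rw [show ((0 : Int)) = (((0 : Nat)) : Int) from rfl, PySem.List.slice_to_natCast]; rfl
      have hl0 : PySem.List.pyGetD (line :: lines) (0 : Int) [] = line :=
        PySem.List.pyGetD_zero_cons _ _ _
      rw [hsl, hl0]
      simp only [geJoin, List.map_nil, PySem.Chars.join_nil, List.nil_append]
      rw [show M - 0 - 4 = M - 4 from by ring]
      simp only [geRec]
      rw [if_neg (show ¬((line.length : Int) + 1 < M) from by rw [hcdef] at h0; omega)]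
    · -- the first line fits whole; align with the tail computation at budget M - c
      have hneg : (List.find? (fun i => decide (M ≤ PySem.List.pyGetD (gePrefix (line :: lines)) (i + 1) 0))
          ((0 : Int) :: List.map ((fun k : Nat => ((k : Nat) : Int)) ∘ Nat.succ) (List.range lines.length)))
          = List.find? (fun i => decide (M ≤ PySem.List.pyGetD (gePrefix (line :: lines)) (i + 1) 0))
            (List.map ((fun k : Nat => ((k : Nat) : Int)) ∘ Nat.succ) (List.range lines.length)) := by
        apply List.find?_cons_of_neg
        show ¬ (decide (M ≤ PySem.List.pyGetD (gePrefix (line :: lines)) ((0 : Int) + 1) 0) = true)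
        rw [h1]; simpa using h0
      rw [hneg]
      rw [show (((fun k : Nat => ((k : Nat) : Int)) ∘ Nat.succ)) = (fun k : Nat => ((k.succ : Nat) : Int)) from rfl]
      have hpred : ∀ k ∈ List.range lines.length,
          ((fun i => decide (M ≤ PySem.List.pyGetD (gePrefix (line :: lines)) (i + 1) 0))
              ∘ fun k : Nat => ((k.succ : Nat) : Int)) k
          = ((fun i => decide (M - c ≤ PySem.List.pyGetD (gePrefix lines) (i + 1) 0))
              ∘ fun k : Nat => ((k : Nat) : Int)) k := by
        intro k hk
        simp only [List.mem_range] at hk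
        simp only [Function.comp_apply]
        have e1 : (((k.succ : Nat)) : Int) + 1 = ((k + 1 : Nat) : Int) + 1 := by push_cast; ring
        rw [e1, gePrefix_getD_succ line lines (k + 1) (by omega)]
        by_cases hm : M - c ≤ PySem.List.pyGetD (gePrefix lines) (((k + 1 : Nat)) : Int) 0
        · rw [decide_eq_true (by push_cast at hm ⊢; omega),
              decide_eq_true (by push_cast at hm ⊢; omega)]
        · rw [decide_eq_false (by push_cast at hm ⊢; omega),
              decide_eq_false (by push_cast at hm ⊢; omega)]
      have hfind :
          (List.find? (fun i => decide (M ≤ PySem.List.pyGetD (gePrefix (line :: lines)) (i + 1) 0))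
              ((List.range lines.length).map fun k : Nat => ((k.succ : Nat) : Int)))
          = ((List.range lines.length).find?
              ((fun i => decide (M - c ≤ PySem.List.pyGetD (gePrefix lines) (i + 1) 0))
                ∘ fun k : Nat => ((k : Nat) : Int))).map (fun k : Nat => ((k.succ : Nat) : Int)) := by
        rw [List.find?_map]
        congr 1
        exact find?_congr_mem _ _ _ hpred
      rw [hfind]
      have hrec : geRec M (line :: lines) = line ++ '\n' :: geExcerptB (M - c) lines := by
        simp only [geRec]
        rw [if_pos (by omega),
          show M - (line.length : Int) - 1 = M - c from by rw [hcdef]; ring, ih (M - c)]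
      rw [hrec]
      simp only [geExcerptB]
      rw [PySem.List.pyRange_zero_natCast, List.find?_map]
      cases hF : (List.range lines.length).find?
          ((fun i => decide (M - c ≤ PySem.List.pyGetD (gePrefix lines) (i + 1) 0))
            ∘ fun k : Nat => ((k : Nat) : Int)) with
      | none =>
        simp only [Option.map_none]
        exact geJoin_cons line lines
      | some k =>
        have hkn : k < lines.length := List.mem_range.mp (List.mem_of_find?_eq_some hF)
        simp only [Option.map_some]
        have hj : PySem.List.pyGetD (gePrefix (line :: lines)) (((k.succ : Nat)) : Int) 0
            = PySem.List.pyGetD (gePrefix lines) ((k : Nat) : Int) 0 + c := by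
          have := gePrefix_getD_succ line lines k (by omega)
          rw [show (((k.succ : Nat)) : Int) = ((k : Int) + 1) from by push_cast; ring]
          exact this
        rw [hj]
        have hslice : PySem.List.slice (line :: lines) none (some (((k.succ : Nat)) : Int))
            = line :: PySem.List.slice lines none (some ((k : Nat) : Int)) := by
          rw [PySem.List.slice_to_natCast, PySem.List.slice_to_natCast]
          rfl
        rw [hslice, geJoin_cons]
        have hline : PySem.List.pyGetD (line :: lines) (((k.succ : Nat)) : Int) []
            = PySem.List.pyGetD lines ((k : Nat) : Int) [] := by
          rw [PySem.List.pyGetD_natCast, PySem.List.pyGetD_natCast, List.getD_cons_succ]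
        rw [hline,
          show M - (PySem.List.pyGetD (gePrefix lines) ((k : Nat) : Int) 0 + c) - 4
              = M - c - PySem.List.pyGetD (gePrefix lines) ((k : Nat) : Int) 0 - 4 from by ring]
        simp only [List.cons_append, List.append_assoc]

-- ===== VERDICT (by name: the statement is the Claim_ definition above) =====
theorem generate_excerpt_spec : Claim_equal_generate_excerpt := by
  intro content max_length _
  have h := geLoopA_eq_geRec max_length (PySem.Chars.splitlines content.toList) []
  simp only [List.length_nil, Nat.cast_zero, List.nil_append, sub_zero] at h
  simp only [Spec_generate_excerpt, generate_excerpt, generate_excerpt_alt, h,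
    geExcerptB_eq_geRec]
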